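-- pv_equiv track=rewrite | github.com/Xt-EHR/xt-ehr-common | scripts/generate_logical_model_docx.py | stable_topological_order
-- ===== SOURCE A (Python) =====
-- import heapq
--
-- def stable_topological_order(base_order: list[str], diff_order: list[str]) -> list[str]:
--     all_keys = list(dict.fromkeys(base_order + diff_order))
--     graph: dict[str, set[str]] = {key: set() for key in all_keys}
--     indegree: dict[str, int] = {key: 0 for key in all_keys}
--     overall_rank = {key: index for index, key in enumerate(all_keys)}
--
--     def add_edge(first: str, second: str) -> None:
--         if first == second:
--             return
--         if second not in graph[first]:
--             graph[first].add(second)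
--             indegree[second] += 1
--
--     def add_edges(order: list[str]) -> None:
--         for first, second in zip(order, order[1:]):
--             add_edge(first, second)
--
--     add_edges(base_order)
--     add_edges(diff_order)
--
--     base_only = set(base_order)
--     for key in diff_order:
--         if key in base_only:
--             continue
--         boundary = find_parent_subtree_boundary(base_order, key)
--         if boundary:
--             add_edge(key, boundary)
--
--     base_rank = {key: index for index, key in enumerate(base_order)}
--     diff_rank = {key: index for index, key in enumerate(diff_order)}
--
--     heap: list[tuple[tuple[int, int, int], str]] = []
--     for position, key in enumerate(all_keys):
--         if indegree[key] == 0: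
--             priority = (base_rank.get(key, 10**9), diff_rank.get(key, 10**9), position)
--             heapq.heappush(heap, (priority, key))
--
--     ordered: list[str] = []
--     while heap:
--         _, key = heapq.heappop(heap)
--         ordered.append(key)
--         for neighbor in graph[key]:
--             indegree[neighbor] -= 1
--             if indegree[neighbor] == 0:
--                 priority = (base_rank.get(neighbor, 10**9), diff_rank.get(neighbor, 10**9), overall_rank[neighbor])
--                 heapq.heappush(heap, (priority, neighbor))
--
--     if len(ordered) != len(all_keys):
--         raise SystemExit("Could not resolve StructureDefinition element order.")
--
--     return ordered
--
-- def parent_key(key: str) -> str: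
--     if "." not in key:
--         return ""
--     return key.rsplit(".", 1)[0]
--
-- def find_parent_subtree_boundary(base_order: list[str], key: str) -> str | None:
--     parent = parent_key(key)
--     if not parent:
--         return None
--     if parent not in base_order:
--         return find_parent_subtree_boundary(base_order, parent)
--
--     parent_index = base_order.index(parent)
--     prefix = f"{parent}."
--     index = parent_index + 1
--     while index < len(base_order):
--         candidate = base_order[index]
--         if candidate.startswith(prefix):
--             index += 1
--             continue
--         return candidate
--     return None
-- ===== SOURCE B (Python) =====
-- def stable_topological_order(base_order: list[str], diff_order: list[str]) -> list[str]:
--     keys = list(dict.fromkeys(base_order + diff_order))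
--     big = 10**9
--     base_rank = {key: index for index, key in enumerate(base_order)}
--     diff_rank = {key: index for index, key in enumerate(diff_order)}
--     overall_rank = {key: index for index, key in enumerate(keys)}
--
--     def prio(k):
--         return (base_rank.get(k, big), diff_rank.get(k, big), overall_rank[k])
--
--     extra = []
--     for d in diff_order:
--         if d not in base_order:
--             b = subtree_boundary(base_order, d)
--             if b:
--                 extra.append((d, b))
--
--     def preds(k):
--         return ([a for a, b in zip(base_order, base_order[1:]) if b == k and a != b]
--                 + [a for a, b in zip(diff_order, diff_order[1:]) if b == k and a != b]
--                 + [a for a, b in extra if b == k])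
--
--     ordered: list[str] = []
--     remaining = keys[:]
--     while remaining:
--         ready = [k for k in remaining if all(p in ordered for p in preds(k))]
--         if not ready:
--             raise SystemExit("Could not resolve StructureDefinition element order.")
--         k = min(ready, key=prio)
--         ordered.append(k)
--         remaining.remove(k)
--     return ordered
--
-- def subtree_boundary(base_order: list[str], key: str) -> str:
--     parent = key[:key.rfind(".")] if "." in key else ""
--     while parent:
--         if parent in base_order:
--             after = base_order[base_order.index(parent) + 1:]
--             return next((c for c in after if not c.startswith(parent + ".")), "")
--         parent = parent[:parent.rfind(".")] if "." in parent else ""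
--     return ""
-- ===== Notes on version B (the rewrite author's own statement) =====
-- stated objective: alternative
-- what changed: A runs Kahn's algorithm over a successor-set graph with maintained indegree counters and a heapq priority queue; B never builds a graph or a heap: it filters the consecutive pairs of both orders into per-key predecessor lists (plus boundary edges collected once) and greedily emits, each round, the priority-minimal remaining key whose predecessors are all emitted.
import Mathlib
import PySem

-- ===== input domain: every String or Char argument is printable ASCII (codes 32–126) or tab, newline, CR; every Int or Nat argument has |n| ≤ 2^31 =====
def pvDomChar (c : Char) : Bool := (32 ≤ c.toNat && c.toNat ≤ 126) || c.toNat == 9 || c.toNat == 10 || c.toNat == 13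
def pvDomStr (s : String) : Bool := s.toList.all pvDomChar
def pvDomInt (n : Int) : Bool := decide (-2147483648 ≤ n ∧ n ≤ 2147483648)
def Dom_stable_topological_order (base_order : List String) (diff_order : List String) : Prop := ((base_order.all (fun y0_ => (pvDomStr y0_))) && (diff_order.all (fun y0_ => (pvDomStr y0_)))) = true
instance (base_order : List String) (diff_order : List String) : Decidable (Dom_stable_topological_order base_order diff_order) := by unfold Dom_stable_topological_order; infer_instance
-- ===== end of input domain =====

-- B replaces A's successor-graph / indegree-counter / heapq Kahn machinery by a direct greedy
-- selection: it computes predecessor LISTS by filtering the consecutive pairs of both orders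
-- (plus the boundary edges, collected once), and repeatedly emits the priority-minimal key all
-- of whose predecessors are already emitted (objective: alternative; not claimed faster).

abbrev PvPrio := Int × Int × Int

-- ===== PORT A =====

-- parent_key: "" when '.' not in key, else key.rsplit(".", 1)[0]
-- (rsplit ported by hand: the characters strictly before the LAST '.'; exact for every string)
def pyParentKey (key : String) : String :=
  if PySem.Str.isIn "." key = false then ""
  else String.ofList (key.toList.take (key.toList.length - 1 - List.idxOf '.' key.toList.reverse))

-- the index-scanning while-loop of find_parent_subtree_boundary, one step per element
def pyScanBoundary (pre : List Char) : List String → Option String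
  | [] => none
  | candidate :: rest =>
    if PySem.Chars.startswith candidate.toList pre then pyScanBoundary pre rest
    else some candidate

-- find_parent_subtree_boundary; fuel = |key| + 1 at the call site (the parent chain strictly
-- shortens the key, so the fuel is never exhausted)
def pyFindParentSubtreeBoundary (base : List String) : Nat → String → Option String
  | 0, _ => none
  | fuel+1, key =>
    let parent := pyParentKey key
    if parent = "" then none
    else if parent ∈ base then
      let parentIndex := (PySem.List.index? base parent).getD 0
      pyScanBoundary (parent.toList ++ ['.']) (base.drop (parentIndex + 1))
    else pyFindParentSubtreeBoundary base fuel parent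

-- add_edge; indegree[second] += 1 ported with modify's default 0: exact, every edge endpoint
-- was seeded into the dict
def pyAddEdge (st : PySem.Dict String (PySem.Set String) × PySem.Dict String Int)
    (first second : String) : PySem.Dict String (PySem.Set String) × PySem.Dict String Int :=
  if first = second then st
  else if second ∈ st.1.getD first PySem.Set.empty then st
  else (st.1.modify first PySem.Set.empty (fun s => s.add second),
        st.2.modify second 0 (fun n => n + 1))

def pyAddEdges (st : PySem.Dict String (PySem.Set String) × PySem.Dict String Int)
    (order : List String) : PySem.Dict String (PySem.Set String) × PySem.Dict String Int :=
  (order.zip order.tail).foldl (fun st p => pyAddEdge st p.1 p.2) st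

-- {key: index for index, key in enumerate(l)}
def pyRankDict (l : List String) : PySem.Dict String Int :=
  (PySem.List.enumerate l).foldl (fun d p => d.insert p.2 p.1) PySem.Dict.empty

-- the 'for key in diff_order' loop adding diff-only-key → subtree-boundary edges
def pyBoundaryFold (base : List String) (baseOnly : PySem.Set String)
    (st : PySem.Dict String (PySem.Set String) × PySem.Dict String Int) (diff : List String) :
    PySem.Dict String (PySem.Set String) × PySem.Dict String Int :=
  diff.foldl (fun st key =>
    if key ∈ baseOnly then st
    else match pyFindParentSubtreeBoundary base (key.toList.length + 1) key with
      | some boundary => if boundary = "" then st else pyAddEdge st key boundary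
      | none => st) st

-- Python's tuple-< on the ((int, int, int), str) heap entries
def pyHeapLt (e f : PvPrio × String) : Bool :=
  e.1.1 < f.1.1 || (e.1.1 == f.1.1 && (e.1.2.1 < f.1.2.1 || (e.1.2.1 == f.1.2.1 &&
    (e.1.2.2 < f.1.2.2 || (e.1.2.2 == f.1.2.2 && decide (e.2 < f.2))))))

-- contract port of heapq: the heap is the list of pushed-and-not-yet-popped entries (push =
-- append) and heappop removes the least entry under Python's tuple order — exactly what
-- heapq computes for any push order
def pyHeapPop (heap : List (PvPrio × String)) :
    Option ((PvPrio × String) × List (PvPrio × String)) :=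
  match heap with
  | [] => none
  | h :: t =>
    let m := t.foldl (fun m e => if pyHeapLt e m then e else m) h
    some (m, heap.erase m)

-- the 'while heap:' loop; fuel = number of keys (every key is pushed at most once); the set
-- iteration 'for neighbor in graph[key]' follows the set's insertion order — exact because
-- the heap returns the unique least entry whatever the push order
def pyKahnLoop (graph : PySem.Dict String (PySem.Set String))
    (baseRank diffRank overallRank : PySem.Dict String Int) :
    Nat → List (PvPrio × String) → PySem.Dict String Int → List String → List String
  | 0, _, _, ordered => ordered
  | fuel+1, heap, indegree, ordered =>
    match pyHeapPop heap with
    | none => ordered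
    | some (e, rest) =>
      let key := e.2
      let st := (graph.getD key PySem.Set.empty).foldl
        (fun (st : List (PvPrio × String) × PySem.Dict String Int) neighbor =>
          let ind := st.2.modify neighbor 0 (fun n => n - 1)
          if ind.getD neighbor 0 == 0 then
            (st.1 ++ [((baseRank.getD neighbor 1000000000, diffRank.getD neighbor 1000000000,
                        overallRank.getD neighbor 0), neighbor)], ind)
          else (st.1, ind)) (rest, indegree)
      pyKahnLoop graph baseRank diffRank overallRank fuel st.1 st.2 (ordered ++ [key])

-- the final 'if len(ordered) != len(all_keys): raise SystemExit' fires exactly when the edge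
-- graph has a cycle; those inputs are outside Pre_ and the port returns the partial order there
def stable_topological_order (base_order : List String) (diff_order : List String) : List String :=
  let all_keys := PySem.List.dedup (base_order ++ diff_order)
  let st0 := (all_keys.foldl (fun d k => d.insert k PySem.Set.empty) PySem.Dict.empty,
              all_keys.foldl (fun d k => d.insert k (0 : Int)) PySem.Dict.empty)
  let st1 := pyAddEdges (pyAddEdges st0 base_order) diff_order
  let st2 := pyBoundaryFold base_order (PySem.Set.ofList base_order) st1 diff_order
  let baseRank := pyRankDict base_order
  let diffRank := pyRankDict diff_order
  let overallRank := pyRankDict all_keys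
  let heap0 := (PySem.List.enumerate all_keys).foldl (fun h p =>
      if st2.2.getD p.2 0 == 0 then
        h ++ [((baseRank.getD p.2 1000000000, diffRank.getD p.2 1000000000, p.1), p.2)]
      else h) []
  pyKahnLoop st2.1 baseRank diffRank overallRank all_keys.length heap0 st2.2 []

-- ===== PORT B =====

-- key[:key.rfind(".")] if "." in key else ""
def altParent (key : String) : String :=
  if PySem.Str.isIn "." key then
    String.ofList (PySem.List.slice key.toList none (some (PySem.Chars.rfind key.toList ['.'])))
  else ""

-- the 'while parent:' loop of subtree_boundary; fuel = |key| + 1 at the call site (each parent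
-- is strictly shorter); base_order.index on a member ported as List.idxOf
def altBoundaryLoop (base : List String) : Nat → String → String
  | 0, _ => ""
  | fuel+1, parent =>
    if parent = "" then ""
    else if parent ∈ base then
      match (PySem.List.slice base (some ((List.idxOf parent base + 1 : Nat) : Int)) none).find?
              (fun c => !PySem.Chars.startswith c.toList (parent.toList ++ ['.'])) with
      | some c => c
      | none => ""
    else altBoundaryLoop base fuel (altParent parent)

def altBoundary (base : List String) (key : String) : String :=
  altBoundaryLoop base (key.toList.length + 1) (altParent key)

-- {key: index for index, key in enumerate(l)}
def altRankDict (l : List String) : PySem.Dict String Int :=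
  (PySem.List.enumerate l).foldl (fun d p => d.insert p.2 p.1) PySem.Dict.empty

-- the extra diff-only-key → boundary edges, collected once
def altExtra (base diff : List String) : List (String × String) :=
  diff.foldl (fun acc d =>
    if d ∈ base then acc
    else
      let b := altBoundary base d
      if b = "" then acc else acc ++ [(d, b)]) []

-- preds(k): the three list comprehensions
def altPreds (base diff : List String) (extra : List (String × String)) (k : String) :
    List String :=
  ((base.zip base.tail).filter (fun p => p.2 == k && p.1 != p.2)).map (fun p => p.1)
  ++ ((diff.zip diff.tail).filter (fun p => p.2 == k && p.1 != p.2)).map (fun p => p.1)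
  ++ (extra.filter (fun p => p.2 == k)).map (fun p => p.1)

-- Python's tuple-< on the (int, int, int) priorities
def altLexLt (p q : PvPrio) : Bool :=
  p.1 < q.1 || (p.1 == q.1 && (p.2.1 < q.2.1 || (p.2.1 == q.2.1 && p.2.2 < q.2.2)))

-- min(ready, key=prio): the first element whose key is minimal (hand port of min; exact:
-- the fold keeps the earlier element on equal keys, as Python's min does)
def altMinBy (prio : String → PvPrio) (x : String) (xs : List String) : String :=
  xs.foldl (fun m y => if altLexLt (prio y) (prio m) then y else m) x

-- the 'while remaining:' loop; fuel = number of keys (one key leaves remaining per round);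
-- remaining.remove(k) via remove? (exact: k ∈ remaining); overall_rank[k] via getD (exact:
-- k ∈ keys always); the SystemExit branch (no ready key) is outside Pre_, the port stops there
def altLoop (prio : String → PvPrio) (preds : String → List String) :
    Nat → List String → List String → List String
  | 0, _, ordered => ordered
  | fuel+1, remaining, ordered =>
    match remaining.filter (fun k => (preds k).all (fun p => ordered.contains p)) with
    | [] => ordered
    | r :: rs =>
      let k := altMinBy prio r rs
      altLoop prio preds fuel ((PySem.List.remove? remaining k).getD remaining) (ordered ++ [k])

def stable_topological_order_alt (base_order : List String) (diff_order : List String) :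
    List String :=
  let keys := PySem.List.dedup (base_order ++ diff_order)
  let baseRank := altRankDict base_order
  let diffRank := altRankDict diff_order
  let overallRank := altRankDict keys
  let extra := altExtra base_order diff_order
  altLoop (fun k => (baseRank.getD k 1000000000, diffRank.getD k 1000000000,
                     overallRank.getD k 0))
          (altPreds base_order diff_order extra)
          keys.length keys []

-- ===== PRECONDITION & SPEC =====

-- one closure step of forward reachability along the edge relation (preds = predecessor lists)
def pvSuccStep (keys : List String) (preds : String → List String) (S : List String) :
    List String :=
  S ++ keys.filter (fun b => !S.contains b && (preds b).any (fun a => S.contains a))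

-- Pre_: the edge graph A builds on the keys (consecutive-element edges of base_order and of
-- diff_order plus diff-only-key → base-subtree-boundary edges) has NO directed cycle; exactly
-- on those inputs A's Kahn loop emits every key and A returns instead of raising SystemExit.
def Pre_stable_topological_order (base_order : List String) (diff_order : List String) : Prop :=
  (let keys := PySem.List.dedup (base_order ++ diff_order)
   let preds := altPreds base_order diff_order (altExtra base_order diff_order)
   keys.all (fun k =>
     !((pvSuccStep keys preds)^[keys.length]
         (keys.filter (fun b => (preds b).contains k))).contains k)) = true

instance (base_order : List String) (diff_order : List String) :
    Decidable (Pre_stable_topological_order base_order diff_order) := by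
  unfold Pre_stable_topological_order; infer_instance

def pvWitness_stable_topological_order : List String × List String := (["a", "b"], ["b", "c"])

def Spec_stable_topological_order (base_order : List String) (diff_order : List String)
    (out : List String) : Prop := out = stable_topological_order_alt base_order diff_order

instance (base_order : List String) (diff_order : List String) (out : List String) :
    Decidable (Spec_stable_topological_order base_order diff_order out) := by
  unfold Spec_stable_topological_order; infer_instance

-- ===== CLAIM (what is proved, stated in full; the proofs are below) =====
def Claim_equal_stable_topological_order : Prop := ∀ (base_order : List String) (diff_order : List String), Dom_stable_topological_order base_order diff_order → Pre_stable_topological_order base_order diff_order → Spec_stable_topological_order base_order diff_order (stable_topological_order base_order diff_order)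

-- ===== LEMMAS AND PROOFS =====
-- (the port-level equality proved below holds for every input; Pre_ is there because the
-- Python A raises SystemExit — returns nothing — outside it)

-- proof-side abbreviations
def pvKeys (base diff : List String) : List String := PySem.List.dedup (base ++ diff)

def pvP (base diff : List String) (k : String) : List String :=
  altPreds base diff (altExtra base diff) k

def pvPrioF (base diff : List String) (k : String) : PvPrio :=
  ((altRankDict base).getD k 1000000000, (altRankDict diff).getD k 1000000000,
   (altRankDict (pvKeys base diff)).getD k 0)

def pvEntry (base diff : List String) (k : String) : PvPrio × String := (pvPrioF base diff k, k)

-- the full edge-pair list A feeds through add_edge, in call order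
def pvEL (base diff : List String) : List (String × String) :=
  base.zip base.tail ++ diff.zip diff.tail ++ altExtra base diff

def pvTo (L : List (String × String)) (a : String) : List String :=
  (L.filter (fun p => p.1 == a && p.1 != p.2)).map (fun p => p.2)

def pvFrom (L : List (String × String)) (b : String) : List String :=
  (L.filter (fun p => p.2 == b && p.1 != p.2)).map (fun p => p.1)

def PvInv (L : List (String × String))
    (G : PySem.Dict String (PySem.Set String)) (I : PySem.Dict String Int) : Prop :=
  (∀ a, G.getD a PySem.Set.empty = PySem.Set.ofList (pvTo L a))
  ∧ (∀ b, I.getD b 0 = ((PySem.Set.ofList (pvFrom L b)).length : Int))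

theorem pv_rfind_go_spec (cs : List Char) (m : Nat) (hm : m < cs.length) (hdot : cs[m] = '.')
    (hlast : ∀ i, m < i → (hi : i < cs.length) → cs[i] ≠ '.') :
    ∀ j, m ≤ j → PySem.Chars.rfind.go cs ['.'] j = (m : Int) := by
  intro j
  induction j with
  | zero =>
    intro hj
    have hm0 : m = 0 := Nat.le_zero.1 hj
    subst hm0
    rcases cs with _ | ⟨c, rest⟩
    · simp at hm
    · have hc : c = '.' := hdot
      simp [PySem.Chars.rfind.go, List.isPrefixOf, hc]
  | succ j ih =>
    intro hj
    rw [show PySem.Chars.rfind.go cs ['.'] (j + 1)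
        = (if List.isPrefixOf ['.'] (cs.drop (j + 1)) then ((j + 1 : Nat) : Int)
           else PySem.Chars.rfind.go cs ['.'] j) from rfl]
    by_cases hjm : m = j + 1
    · subst hjm
      rw [List.drop_eq_getElem_cons hm]
      simp [List.isPrefixOf, hdot]
    · have hmj : m ≤ j := by omega
      have hpre : List.isPrefixOf ['.'] (cs.drop (j + 1)) = false := by
        by_cases hl : j + 1 < cs.length
        · rw [List.drop_eq_getElem_cons hl]
          have hne := hlast (j + 1) (by omega) hl
          have hne' : ¬ ('.' = cs[j + 1]) := fun he => hne he.symm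
          simp [List.isPrefixOf, hne']
        · rw [List.drop_eq_nil_of_le (by omega)]
          rfl
      rw [hpre]
      simp only [Bool.false_eq_true, if_false]
      exact ih hmj

theorem pv_rfind_last (cs : List Char) (h : '.' ∈ cs) :
    PySem.Chars.rfind cs ['.']
      = ((cs.length - 1 - List.idxOf '.' cs.reverse : Nat) : Int) := by
  have hrev : '.' ∈ cs.reverse := by simpa using h
  have hrlen : List.idxOf '.' cs.reverse < cs.length := by
    have := List.idxOf_lt_length_of_mem hrev
    simpa using this
  have hrlen' : List.idxOf '.' cs.reverse < cs.reverse.length := by simpa using hrlen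
  have hdot : cs[cs.length - 1 - List.idxOf '.' cs.reverse]'(by omega) = '.' := by
    have hg := List.getElem_reverse (l := cs) (i := List.idxOf '.' cs.reverse) hrlen'
    rw [List.getElem_idxOf hrlen'] at hg
    exact hg.symm
  have hlast : ∀ i, cs.length - 1 - List.idxOf '.' cs.reverse < i →
      (hi : i < cs.length) → cs[i] ≠ '.' := by
    intro i hmi hi hne
    have hj : cs.length - 1 - i < List.idxOf '.' cs.reverse := by omega
    have hjlen : cs.length - 1 - i < cs.reverse.length := by
      simp
      omega
    have hgr := List.getElem_reverse (l := cs) (i := cs.length - 1 - i) hjlen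
    have hgi : cs.length - 1 - (cs.length - 1 - i) = i := Nat.sub_sub_self (by omega)
    have hfalse := List.not_of_lt_findIdx (p := (· == '.')) (xs := cs.reverse)
      (i := cs.length - 1 - i) hj
    have hfalse' : ¬ (cs.reverse[cs.length - 1 - i]'hjlen = '.') := by simpa using hfalse
    apply hfalse'
    rw [hgr]
    simp only [hgi]
    exact hne
  have hspec := pv_rfind_go_spec cs (cs.length - 1 - List.idxOf '.' cs.reverse)
    (by omega) hdot hlast cs.length (by omega)
  simpa [PySem.Chars.rfind] using hspec

theorem pv_parent_eq (key : String) : pyParentKey key = altParent key := by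
  unfold pyParentKey altParent
  by_cases hin : PySem.Str.isIn "." key
  · rw [if_neg (by simpa using hin), if_pos hin]
    have hmem : '.' ∈ key.toList := by
      have h1 := (PySem.Str.isIn_iff_infix _ _).1 hin
      exact (List.singleton_infix_iff '.' key.toList).1 (by simpa using h1)
    rw [pv_rfind_last _ hmem, PySem.List.slice_to_natCast]
  · rw [if_pos (by simpa using hin), if_neg hin]

theorem pv_scan_eq (pre : List Char) (l : List String) :
    pyScanBoundary pre l = l.find? (fun c => !PySem.Chars.startswith c.toList pre) := by
  induction l with
  | nil => rfl
  | cons c rest ih =>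
    by_cases h : PySem.Chars.startswith c.toList pre
    · simp [pyScanBoundary, List.find?, h, ih]
    · simp only [Bool.not_eq_true] at h
      simp [pyScanBoundary, List.find?, h]

theorem pv_index?_getD (l : List String) (a : String) (h : a ∈ l) :
    (PySem.List.index? l a).getD 0 = List.idxOf a l := by
  rw [PySem.List.index?_eq_idxOf?]
  rcases hi : List.idxOf? a l with _ | i
  · exact absurd (List.idxOf?_eq_none_iff.1 hi) (by simpa using h)
  · have hg := List.idxOf_eq_getD_idxOf? a l
    rw [hi] at hg
    simp [hg]

theorem pv_boundary_eq (base : List String) (f : Nat) (key : String) :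
    altBoundaryLoop base f (pyParentKey key) = (pyFindParentSubtreeBoundary base f key).getD "" := by
  induction f generalizing key with
  | zero => simp [altBoundaryLoop, pyFindParentSubtreeBoundary]
  | succ f ih =>
    unfold altBoundaryLoop pyFindParentSubtreeBoundary
    by_cases h1 : pyParentKey key = ""
    · simp [h1]
    · simp only [h1, if_false]
      by_cases h2 : pyParentKey key ∈ base
      · simp only [h2, if_true]
        rw [pv_scan_eq, pv_index?_getD base _ h2, PySem.List.slice_from_natCast]
        rcases hfind : (base.drop (List.idxOf (pyParentKey key) base + 1)).find?
            (fun c => !PySem.Chars.startswith c.toList ((pyParentKey key).toList ++ ['.'])) with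
          _ | c <;> simp [hfind]
      · simp only [h2, if_false]
        rw [← pv_parent_eq]
        exact ih (pyParentKey key)

theorem pv_boundary_eq' (base : List String) (key : String) :
    altBoundary base key
      = (pyFindParentSubtreeBoundary base (key.toList.length + 1) key).getD "" := by
  rw [altBoundary, ← pv_parent_eq, pv_boundary_eq]

theorem pv_boundary_mem (base : List String) (key : String)
    (h : altBoundary base key ≠ "") : altBoundary base key ∈ base := by
  unfold altBoundary at *
  generalize hf : key.toList.length + 1 = f at *
  generalize hp : altParent key = p at *
  clear hf hp
  induction f generalizing p with
  | zero => simp [altBoundaryLoop] at h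
  | succ f ih =>
    unfold altBoundaryLoop at h ⊢
    by_cases h1 : p = ""
    · simp [h1] at h
    · simp only [h1, if_false] at h ⊢
      by_cases h2 : p ∈ base
      · simp only [h2, if_true] at h ⊢
        rcases hfind : (PySem.List.slice base (some ((List.idxOf p base + 1 : Nat) : Int))
            none).find? (fun c => !PySem.Chars.startswith c.toList (p.toList ++ ['.'])) with
          _ | c
        · rw [hfind] at h; simp at h
        · rw [hfind]
          have := List.find?_some hfind
          have hc : c ∈ PySem.List.slice base (some ((List.idxOf p base + 1 : Nat) : Int)) none :=
            List.mem_of_find?_eq_some hfind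
          exact PySem.List.mem_of_mem_slice _ _ _ hc
      · simp only [h2, if_false] at h ⊢
        exact ih _ h

theorem pv_getD_const_fold {ν : Type} (keys : List String) (v d0 : ν)
    (d : PySem.Dict String ν) (x : String) :
    (keys.foldl (fun d k => d.insert k v) d).getD x d0 = if x ∈ keys then v else d.getD x d0 := by
  induction keys generalizing d with
  | nil => simp
  | cons k ks ih =>
    simp only [List.foldl_cons, ih]
    by_cases hx : x ∈ ks
    · simp [hx]
    · by_cases hk : x = k
      · subst hk; simp [hx, PySem.Dict.getD_insert_self]
      · simp [hx, hk, PySem.Dict.getD_insert_of_ne _ _ _ hk]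

theorem pv_rank_get? (l : List String) (hl : l.Nodup) (s : Int)
    (d : PySem.Dict String Int) (k : String) :
    ((PySem.List.enumerate l s).foldl (fun d p => d.insert p.2 p.1) d).get? k =
      if k ∈ l then some (s + (List.idxOf k l : Int)) else d.get? k := by
  induction l generalizing s d with
  | nil => simp
  | cons x xs ih =>
    have hnd := List.nodup_cons.1 hl
    rw [PySem.List.enumerate_cons, List.foldl_cons, ih hnd.2]
    by_cases hx : k ∈ xs
    · have hne : x ≠ k := fun he => hnd.1 (he ▸ hx)
      have hidx : List.idxOf k (x :: xs) = List.idxOf k xs + 1 := by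
        simp [List.idxOf_cons, beq_eq_false_iff_ne.mpr hne]
      simp only [hx, if_true, List.mem_cons, or_true, hidx]
      congr 1
      push_cast
      ring
    · by_cases hk : k = x
      · subst hk
        simp [hx, PySem.Dict.get?_insert_self, List.idxOf_cons]
      · have hnm : k ∉ x :: xs := by simp [hk, hx]
        simp only [hx, if_false, hnm]
        simp [PySem.Dict.get?_insert_of_ne _ _ hk]

theorem pv_rank_getD (l : List String) (hl : l.Nodup) (k : String) (hk : k ∈ l) (d0 : Int) :
    (altRankDict l).getD k d0 = (List.idxOf k l : Int) := by
  have h := pv_rank_get? l hl 0 PySem.Dict.empty k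
  simp only [hk, if_true, zero_add] at h
  unfold altRankDict
  simp [PySem.Dict.getD, h]

theorem pv_extra_flatMap (base diff : List String) :
    altExtra base diff = diff.flatMap (fun d =>
      if d ∈ base then []
      else if altBoundary base d = "" then [] else [(d, altBoundary base d)]) := by
  have hb : (fun (acc : List (String × String)) d =>
      if d ∈ base then acc
      else
        let b := altBoundary base d
        if b = "" then acc else acc ++ [(d, b)])
      = (fun acc d => acc ++ (if d ∈ base then []
          else if altBoundary base d = "" then [] else [(d, altBoundary base d)])) := by
    funext acc d
    split_ifs <;> simp_all
  unfold altExtra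
  rw [hb, PySem.List.foldl_append_eq_flatMap]
  simp

theorem pv_extra_mem (base diff : List String) (p : String × String)
    (hp : p ∈ altExtra base diff) : p.1 ∈ diff ∧ p.1 ∉ base ∧ p.2 ∈ base := by
  rw [pv_extra_flatMap] at hp
  rcases List.mem_flatMap.1 hp with ⟨d, hd, hmem⟩
  by_cases h1 : d ∈ base
  · simp [h1] at hmem
  · by_cases h2 : altBoundary base d = ""
    · simp [h1, h2] at hmem
    · simp only [h1, if_false, h2, if_false, List.mem_singleton] at hmem
      subst hmem
      exact ⟨hd, h1, pv_boundary_mem base d h2⟩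

theorem pv_P_mem (base diff : List String) (b a : String) (ha : a ∈ pvP base diff b) :
    a ∈ pvKeys base diff ∧ b ∈ pvKeys base diff ∧ a ≠ b := by
  have hkey : ∀ x : String, x ∈ base ∨ x ∈ diff → x ∈ pvKeys base diff := by
    intro x hx
    unfold pvKeys
    rw [PySem.List.mem_dedup, List.mem_append]
    exact hx
  unfold pvP altPreds at ha
  rcases List.mem_append.1 ha with h12 | h3
  · rcases List.mem_append.1 h12 with h1 | h2
    · rcases List.mem_map.1 h1 with ⟨⟨pa, pb⟩, hp, rfl⟩
      rcases List.mem_filter.1 hp with ⟨hz, hcond⟩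
      simp only [beq_iff_eq, bne_iff_ne, Bool.and_eq_true, decide_eq_true_eq, ne_eq] at hcond
      have hm := List.of_mem_zip hz
      exact ⟨hkey _ (Or.inl hm.1), hcond.1 ▸ hkey _ (Or.inl (List.mem_of_mem_tail hm.2)),
        hcond.1 ▸ hcond.2⟩
    · rcases List.mem_map.1 h2 with ⟨⟨pa, pb⟩, hp, rfl⟩
      rcases List.mem_filter.1 hp with ⟨hz, hcond⟩
      simp only [beq_iff_eq, bne_iff_ne, Bool.and_eq_true, decide_eq_true_eq, ne_eq] at hcond
      have hm := List.of_mem_zip hz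
      exact ⟨hkey _ (Or.inr hm.1), hcond.1 ▸ hkey _ (Or.inr (List.mem_of_mem_tail hm.2)),
        hcond.1 ▸ hcond.2⟩
  · rcases List.mem_map.1 h3 with ⟨⟨pa, pb⟩, hp, rfl⟩
    rcases List.mem_filter.1 hp with ⟨hx, hcond⟩
    simp only [beq_iff_eq] at hcond
    have hm := pv_extra_mem base diff _ hx
    refine ⟨hkey _ (Or.inr hm.1), hcond ▸ hkey _ (Or.inl hm.2.2), hcond ▸ ?_⟩
    intro he
    exact hm.2.1 (he ▸ hm.2.2)

theorem pv_from_EL (base diff : List String) (b : String) :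
    pvFrom (pvEL base diff) b = pvP base diff b := by
  have h3 : (altExtra base diff).filter (fun p => p.2 == b && p.1 != p.2)
      = (altExtra base diff).filter (fun p => p.2 == b) := by
    refine List.filter_congr fun p hp => ?_
    have hm := pv_extra_mem base diff p hp
    have : p.1 ≠ p.2 := fun he => hm.2.1 (he ▸ hm.2.2)
    simp [this]
  unfold pvFrom pvEL pvP altPreds
  rw [List.filter_append, List.filter_append, List.map_append, List.map_append, h3]

theorem pv_to_from (L : List (String × String)) (a b : String) :
    (b ∈ pvTo L a) ↔ (a ∈ pvFrom L b) := by
  unfold pvTo pvFrom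
  simp only [List.mem_map, List.mem_filter, Bool.and_eq_true, beq_iff_eq, bne_iff_ne, ne_eq]
  constructor
  · rintro ⟨⟨pa, pb⟩, ⟨⟨hmem, h1, h2⟩, rfl⟩⟩
    exact ⟨(pa, pb), ⟨hmem, rfl, h2⟩, h1⟩
  · rintro ⟨⟨pa, pb⟩, ⟨⟨hmem, h1, h2⟩, rfl⟩⟩
    exact ⟨(pa, pb), ⟨hmem, rfl, h2⟩, h1⟩

theorem pv_ofList_snoc {α : Type} [BEq α] (l : List α) (x : α) :
    PySem.Set.ofList (l ++ [x]) = (PySem.Set.ofList l).add x := by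
  simp [PySem.Set.ofList, List.foldl_append]

theorem pv_length_add_not_mem {α : Type} [BEq α] [LawfulBEq α] (s : PySem.Set α) (x : α)
    (hx : x ∉ s) : (s.add x).length = s.length + 1 := by
  have hc : s.contains x = false := by simpa using hx
  simp [PySem.Set.add, hx]

theorem pv_addEdge_inv (L : List (String × String))
    (G : PySem.Dict String (PySem.Set String)) (I : PySem.Dict String Int)
    (h : PvInv L G I) (a b : String) :
    PvInv (L ++ [(a, b)]) (pyAddEdge (G, I) a b).1 (pyAddEdge (G, I) a b).2 := by
  obtain ⟨h1, h2⟩ := h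
  have hTo : ∀ x, pvTo (L ++ [(a, b)]) x
      = pvTo L x ++ (if a = x ∧ a ≠ b then [b] else []) := by
    intro x
    unfold pvTo
    rw [List.filter_append, List.map_append]
    congr 1
    by_cases hx : a = x
    · subst hx
      by_cases hab : a = b <;> simp [hab]
    · by_cases hab : a = b <;> simp [hx, hab]
  have hFrom : ∀ x, pvFrom (L ++ [(a, b)]) x
      = pvFrom L x ++ (if b = x ∧ a ≠ b then [a] else []) := by
    intro x
    unfold pvFrom
    rw [List.filter_append, List.map_append]
    congr 1
    by_cases hx : b = x
    · subst hx
      by_cases hab : a = b <;> simp [hab]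
    · by_cases hab : a = b <;> simp [hx, hab]
  unfold pyAddEdge
  by_cases hab : a = b
  · simp only [if_pos hab]
    exact ⟨fun x => by rw [h1, hTo]; simp [hab],
           fun x => by rw [h2, hFrom]; simp [hab]⟩
  · simp only [if_neg hab]
    by_cases hmem : b ∈ (G, I).1.getD a PySem.Set.empty
    · simp only [if_pos hmem]
      have hbm : b ∈ PySem.Set.ofList (pvTo L a) := by rw [← h1]; exact hmem
      have ham : a ∈ PySem.Set.ofList (pvFrom L b) := by
        rw [PySem.Set.mem_ofList] at hbm ⊢
        exact (pv_to_from L a b).1 hbm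
      constructor
      · intro x
        rw [hTo]
        by_cases hx : a = x
        · subst hx
          rw [if_pos ⟨rfl, hab⟩, pv_ofList_snoc, PySem.Set.add_of_mem hbm, h1]
        · rw [if_neg (fun hc => hx hc.1)]
          simpa using h1 x
      · intro x
        rw [hFrom]
        by_cases hx : b = x
        · subst hx
          rw [if_pos ⟨rfl, hab⟩, pv_ofList_snoc, PySem.Set.add_of_mem ham, h2]
        · rw [if_neg (fun hc => hx hc.1)]
          simpa using h2 x
    · simp only [if_neg hmem]
      have hbm : b ∉ PySem.Set.ofList (pvTo L a) := by rw [← h1]; exact hmem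
      have ham : a ∉ PySem.Set.ofList (pvFrom L b) := by
        rw [PySem.Set.mem_ofList] at hbm ⊢
        exact fun hmm => hbm ((pv_to_from L a b).2 hmm)
      constructor
      · intro x
        rw [hTo]
        by_cases hx : a = x
        · subst hx
          rw [if_pos ⟨rfl, hab⟩, PySem.Dict.getD_modify_self, h1, pv_ofList_snoc]
        · rw [if_neg (fun hc => hx hc.1), PySem.Dict.getD_modify_of_ne _ _ _
            (fun hc => hx hc.symm), h1]
          simp
      · intro x
        rw [hFrom]
        by_cases hx : b = x
        · subst hx
          rw [if_pos ⟨rfl, hab⟩, PySem.Dict.getD_modify_self, h2, pv_ofList_snoc,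
            pv_length_add_not_mem _ _ ham]
          push_cast
          ring
        · rw [if_neg (fun hc => hx hc.1), PySem.Dict.getD_modify_of_ne _ _ _
            (fun hc => hx hc.symm), h2]
          simp

theorem pv_addEdge_fold (M L : List (String × String))
    (G : PySem.Dict String (PySem.Set String)) (I : PySem.Dict String Int)
    (h : PvInv L G I) :
    PvInv (L ++ M) (M.foldl (fun st p => pyAddEdge st p.1 p.2) (G, I)).1
      (M.foldl (fun st p => pyAddEdge st p.1 p.2) (G, I)).2 := by
  induction M generalizing L G I with
  | nil => simpa using h
  | cons p M ih =>
    rw [List.foldl_cons]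
    have h' := pv_addEdge_inv L G I h p.1 p.2
    have hrec := ih (L ++ [(p.1, p.2)]) (pyAddEdge (G, I) p.1 p.2).1
      (pyAddEdge (G, I) p.1 p.2).2 h'
    simpa [Prod.mk.eta, List.append_assoc] using hrec

theorem pv_addEdge_fold' (M L : List (String × String))
    (st : PySem.Dict String (PySem.Set String) × PySem.Dict String Int)
    (h : PvInv L st.1 st.2) :
    PvInv (L ++ M) ((M.foldl (fun st p => pyAddEdge st p.1 p.2) st)).1
      ((M.foldl (fun st p => pyAddEdge st p.1 p.2) st)).2 := by
  obtain ⟨G, I⟩ := st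
  exact pv_addEdge_fold M L G I h

theorem pv_boundary_fold_eq (base diff : List String)
    (st : PySem.Dict String (PySem.Set String) × PySem.Dict String Int) :
    pyBoundaryFold base (PySem.Set.ofList base) st diff =
      (altExtra base diff).foldl (fun st p => pyAddEdge st p.1 p.2) st := by
  rw [pv_extra_flatMap]
  unfold pyBoundaryFold
  induction diff generalizing st with
  | nil => rfl
  | cons d ds ih =>
    rw [List.foldl_cons, List.flatMap_cons, List.foldl_append]
    have hstep : (if d ∈ PySem.Set.ofList base then st
        else match pyFindParentSubtreeBoundary base (d.toList.length + 1) d with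
          | some boundary => if boundary = "" then st else pyAddEdge st d boundary
          | none => st)
        = (if d ∈ base then ([] : List (String × String))
           else if altBoundary base d = "" then [] else [(d, altBoundary base d)]).foldl
            (fun st p => pyAddEdge st p.1 p.2) st := by
      by_cases h1 : d ∈ base
      · simp [h1, PySem.Set.mem_ofList]
      · have hm : d ∉ PySem.Set.ofList base := by
          simpa [PySem.Set.mem_ofList] using h1
        rw [if_neg hm, if_neg h1]
        rcases hf : pyFindParentSubtreeBoundary base (d.toList.length + 1) d with _ | bd
        · have hb : altBoundary base d = "" := by rw [pv_boundary_eq', hf]; rfl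
          simp [hb]
        · have hb : altBoundary base d = bd := by rw [pv_boundary_eq', hf]; rfl
          by_cases h2 : bd = ""
          · simp [hb, h2]
          · simp [hb, h2]
    rw [hstep]
    exact ih _

-- Kahn's inner neighbor fold, characterized
theorem pv_kahn_fold (f : String → PvPrio × String) (S : List String) (hS : S.Nodup)
    (h : List (PvPrio × String)) (d : PySem.Dict String Int) :
    S.foldl (fun (st : List (PvPrio × String) × PySem.Dict String Int) n =>
        let ind := st.2.modify n 0 (fun x => x - 1)
        if ind.getD n 0 == 0 then (st.1 ++ [f n], ind) else (st.1, ind)) (h, d)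
      = (h ++ (S.filter (fun n => d.getD n 0 == 1)).map f,
         S.foldl (fun d n => d.modify n 0 (fun x => x - 1)) d) := by
  induction S generalizing h d with
  | nil => simp
  | cons n S ih =>
    have hnd := List.nodup_cons.1 hS
    rw [List.foldl_cons, List.foldl_cons]
    have hcond : ((d.modify n 0 (fun x => x - 1)).getD n 0 == 0) = (d.getD n 0 == 1) := by
      rw [PySem.Dict.getD_modify_self]
      by_cases h1 : d.getD n 0 = 1
      · simp [h1]
      · have h2 : ¬ d.getD n 0 - 1 = 0 := by omega
        simp [h1, h2]
    have hfilter : S.filter (fun m => (d.modify n 0 (fun x => x - 1)).getD m 0 == 1)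
        = S.filter (fun m => d.getD m 0 == 1) :=
      List.filter_congr fun m hm => by
        rw [PySem.Dict.getD_modify_of_ne _ _ _ (fun he => hnd.1 (by rw [← he]; exact hm))]
    rw [List.filter_cons]
    change List.foldl _ (if (d.modify n 0 (fun x => x - 1)).getD n 0 == 0 then
        (h ++ [f n], d.modify n 0 (fun x => x - 1))
      else (h, d.modify n 0 (fun x => x - 1))) S = _
    rw [hcond]
    by_cases hc : d.getD n 0 = 1
    · simp only [hc, beq_self_eq_true, if_true]
      rw [ih hnd.2, hfilter]
      simp
    · have hcb : (d.getD n 0 == 1) = false := beq_eq_false_iff_ne.mpr hc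
      simp only [hcb, Bool.false_eq_true, if_false]
      rw [ih hnd.2, hfilter]

theorem pv_dec_getD (S : List String) (d : PySem.Dict String Int) (b : String) :
    (S.foldl (fun d n => d.modify n 0 (fun x => x - 1)) d).getD b 0
      = d.getD b 0 - (S.count b : Int) := by
  induction S generalizing d with
  | nil => simp
  | cons n S ih =>
    rw [List.foldl_cons, ih, List.count_cons]
    by_cases hb : b = n
    · subst hb
      rw [PySem.Dict.getD_modify_self]
      push_cast
      simp
      ring
    · rw [PySem.Dict.getD_modify_of_ne _ _ _ hb]
      have hbe : (n == b) = false := beq_eq_false_iff_ne.mpr (fun he => hb he.symm)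
      rw [hbe]
      push_cast
      ring

-- fold-min lemmas (generic in the Bool comparison)
theorem pv_foldl_min_mem {α : Type} (lt : α → α → Bool) (x : α) (xs : List α) :
    xs.foldl (fun m e => if lt e m then e else m) x ∈ x :: xs := by
  induction xs generalizing x with
  | nil => simp
  | cons e xs ih =>
    rw [List.foldl_cons]
    have h := ih (if lt e x then e else x)
    by_cases hlt : lt e x <;> simp only [hlt, if_true, if_false] at h ⊢ <;>
      simp only [List.mem_cons] at h ⊢ <;> tauto

theorem pv_foldl_min_not_lt {α : Type} (lt : α → α → Bool)
    (hirr : ∀ a, lt a a = false)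
    (htr : ∀ a b c, lt a b = true → lt b c = true → lt a c = true)
    (hneg : ∀ a b c, lt a b = false → lt b c = false → lt a c = false)
    (x : α) (xs : List α) :
    ∀ y ∈ x :: xs, lt y (xs.foldl (fun m e => if lt e m then e else m) x) = false := by
  induction xs generalizing x with
  | nil =>
    intro y hy
    simp only [List.mem_singleton] at hy
    subst hy
    simpa using hirr y
  | cons e xs ih =>
    intro y hy
    rw [List.foldl_cons]
    by_cases hlt : lt e x
    · rw [if_pos hlt]
      rcases List.mem_cons.1 hy with rfl | hy'
      · cases hxr : lt y (xs.foldl (fun m e => if lt e m then e else m) e)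
        · rfl
        · have h1 := ih e e (by simp)
          exact absurd (htr e y _ hlt hxr) (by simp [h1])
      · rcases List.mem_cons.1 hy' with rfl | hy''
        · exact ih _ _ (by simp)
        · exact ih e y (List.mem_cons_of_mem _ hy'')
    · rw [if_neg hlt]
      rcases List.mem_cons.1 hy with rfl | hy'
      · exact ih _ _ (by simp)
      · rcases List.mem_cons.1 hy' with rfl | hy''
        · have h1 := ih x x (by simp)
          exact hneg y x _ (by simpa using hlt) h1
        · exact ih x y (List.mem_cons_of_mem _ hy'')

def pvKey3 (p : PvPrio) : Lex (Int × Lex (Int × Int)) := toLex (p.1, toLex (p.2.1, p.2.2))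

def pvKey4 (e : PvPrio × String) : Lex (Int × Lex (Int × Lex (Int × String))) :=
  toLex (e.1.1, toLex (e.1.2.1, toLex (e.1.2.2, e.2)))

theorem pv_lexLt_iff (p q : PvPrio) : altLexLt p q = true ↔ pvKey3 p < pvKey3 q := by
  rcases p with ⟨p1, p2, p3⟩
  rcases q with ⟨q1, q2, q3⟩
  simp [altLexLt, pvKey3, Prod.Lex.lt_iff]

theorem pv_heapLt_iff (e f : PvPrio × String) : pyHeapLt e f = true ↔ pvKey4 e < pvKey4 f := by
  rcases e with ⟨⟨e1, e2, e3⟩, es⟩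
  rcases f with ⟨⟨f1, f2, f3⟩, fs⟩
  simp [pyHeapLt, pvKey4, Prod.Lex.lt_iff]

theorem pv_key3_inj (p q : PvPrio) (h : pvKey3 p = pvKey3 q) : p = q := by
  rcases p with ⟨p1, p2, p3⟩
  rcases q with ⟨q1, q2, q3⟩
  simp only [pvKey3, toLex_inj, Prod.mk.injEq] at h
  obtain ⟨rfl, rfl, rfl⟩ := h
  rfl

theorem pv_key4_lt_iff (p q : PvPrio) (x y : String) :
    pvKey4 (p, x) < pvKey4 (q, y) ↔ (pvKey3 p < pvKey3 q ∨ (p = q ∧ x < y)) := by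
  rcases p with ⟨p1, p2, p3⟩
  rcases q with ⟨q1, q2, q3⟩
  simp only [pvKey4, pvKey3, Prod.Lex.lt_iff, ofLex_toLex, Prod.mk.injEq]
  tauto

theorem pv_heapLt_irr (e : PvPrio × String) : pyHeapLt e e = false := by
  cases hb : pyHeapLt e e
  · rfl
  · exact absurd ((pv_heapLt_iff e e).1 hb) (lt_irrefl _)

theorem pv_heapLt_tr (a b c : PvPrio × String) :
    pyHeapLt a b = true → pyHeapLt b c = true → pyHeapLt a c = true := by
  intro h1 h2
  exact (pv_heapLt_iff _ _).2 (lt_trans ((pv_heapLt_iff _ _).1 h1) ((pv_heapLt_iff _ _).1 h2))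

theorem pv_heapLt_neg (a b c : PvPrio × String) :
    pyHeapLt a b = false → pyHeapLt b c = false → pyHeapLt a c = false := by
  intro h1 h2
  cases hac : pyHeapLt a c
  · rfl
  · exfalso
    have hlt := (pv_heapLt_iff a c).1 hac
    have hba : pvKey4 b ≤ pvKey4 a :=
      not_lt.1 fun hl => absurd ((pv_heapLt_iff a b).2 hl) (by simp [h1])
    have hcb : pvKey4 c ≤ pvKey4 b :=
      not_lt.1 fun hl => absurd ((pv_heapLt_iff b c).2 hl) (by simp [h2])
    exact absurd hlt (not_lt.2 (le_trans hcb hba))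

theorem pv_lexLt_irr (p : PvPrio) : altLexLt p p = false := by
  cases hb : altLexLt p p
  · rfl
  · exact absurd ((pv_lexLt_iff p p).1 hb) (lt_irrefl _)

theorem pv_lexLt_tr (p q r : PvPrio) :
    altLexLt p q = true → altLexLt q r = true → altLexLt p r = true := by
  intro h1 h2
  exact (pv_lexLt_iff _ _).2 (lt_trans ((pv_lexLt_iff _ _).1 h1) ((pv_lexLt_iff _ _).1 h2))

theorem pv_lexLt_neg (p q r : PvPrio) :
    altLexLt p q = false → altLexLt q r = false → altLexLt p r = false := by
  intro h1 h2
  cases hac : altLexLt p r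
  · rfl
  · exfalso
    have hlt := (pv_lexLt_iff p r).1 hac
    have hba : pvKey3 q ≤ pvKey3 p :=
      not_lt.1 fun hl => absurd ((pv_lexLt_iff p q).2 hl) (by simp [h1])
    have hcb : pvKey3 r ≤ pvKey3 q :=
      not_lt.1 fun hl => absurd ((pv_lexLt_iff q r).2 hl) (by simp [h2])
    exact absurd hlt (not_lt.2 (le_trans hcb hba))

theorem pv_heapLt_of_prio_ne (p q : PvPrio) (x y : String) (hne : p ≠ q) :
    pyHeapLt (p, x) (q, y) = altLexLt p q := by
  cases hb : altLexLt p q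
  · cases hh : pyHeapLt (p, x) (q, y)
    · rfl
    · exfalso
      have hk := (pv_heapLt_iff _ _).1 hh
      rw [pv_key4_lt_iff] at hk
      rcases hk with h | ⟨rfl, _⟩
      · exact absurd ((pv_lexLt_iff p q).2 h) (by simp [hb])
      · exact hne rfl
  · exact (pv_heapLt_iff _ _).2 ((pv_key4_lt_iff p q x y).2
      (Or.inl ((pv_lexLt_iff p q).1 hb)))

theorem pv_lexLt_total (p q : PvPrio) (h1 : altLexLt p q = false) (h2 : altLexLt q p = false) :
    p = q := by
  refine pv_key3_inj p q (le_antisymm ?_ ?_)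
  · exact not_lt.1 fun hl => absurd ((pv_lexLt_iff q p).2 hl) (by simp [h2])
  · exact not_lt.1 fun hl => absurd ((pv_lexLt_iff p q).2 hl) (by simp [h1])

theorem pv_prio_inj (base diff : List String) (k k' : String)
    (hk : k ∈ pvKeys base diff) (hk' : k' ∈ pvKeys base diff)
    (h : pvPrioF base diff k = pvPrioF base diff k') : k = k' := by
  have hnd : (pvKeys base diff).Nodup := by
    unfold pvKeys
    exact PySem.List.nodup_dedup _
  have h3 := congrArg (fun t : PvPrio => t.2.2) h
  simp only [pvPrioF] at h3
  rw [pv_rank_getD _ hnd _ hk, pv_rank_getD _ hnd _ hk'] at h3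
  have hidx : List.idxOf k (pvKeys base diff) = List.idxOf k' (pvKeys base diff) := by
    exact_mod_cast h3
  have hk1 : List.idxOf k (pvKeys base diff) < (pvKeys base diff).length :=
    List.idxOf_lt_length_of_mem hk
  have hk2 : List.idxOf k' (pvKeys base diff) < (pvKeys base diff).length :=
    List.idxOf_lt_length_of_mem hk'
  have e1 := List.getElem_idxOf hk1
  have e2 := List.getElem_idxOf hk2
  rw [← e1, ← e2]
  congr 1

theorem pv_perm_of_mem_iff (l1 l2 : List String) (h1 : l1.Nodup) (h2 : l2.Nodup)
    (h : ∀ x, x ∈ l1 ↔ x ∈ l2) : l1.Perm l2 :=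
  List.perm_of_nodup_nodup_toFinset_eq h1 h2 (Finset.ext fun x => by
    simp only [List.mem_toFinset]
    exact h x)

theorem pv_filter_erase_eq (l R : List String) (hl : l.Nodup) (hR : R.Nodup) (k : String) :
    l.filter (fun p => (R.erase k).contains p)
      = (l.filter (fun p => R.contains p)).erase k := by
  rw [List.Nodup.erase_eq_filter (List.Nodup.filter _ hl), List.filter_filter]
  refine List.filter_congr fun p hp => ?_
  by_cases hpk : p = k
  · subst hpk
    simp [List.Nodup.mem_erase_iff hR]
  · simp [List.Nodup.mem_erase_iff hR, hpk]

theorem pv_filter_erase_len (l R : List String) (hl : l.Nodup) (hR : R.Nodup) (k : String)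
    (hkl : k ∈ l) (hkR : k ∈ R) :
    (l.filter (fun p => (R.erase k).contains p)).length + 1
      = (l.filter (fun p => R.contains p)).length := by
  rw [pv_filter_erase_eq l R hl hR k]
  have hkf : k ∈ l.filter (fun p => R.contains p) := List.mem_filter.2 ⟨hkl, by simpa⟩
  have h1 := List.length_erase_of_mem hkf
  have h2 : 0 < (l.filter (fun p => R.contains p)).length := List.length_pos_of_mem hkf
  omega

theorem pv_filter_congr_not_mem (l R : List String) (hR : R.Nodup) (k : String) (hkl : k ∉ l) :
    l.filter (fun p => (R.erase k).contains p) = l.filter (fun p => R.contains p) :=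
  List.filter_congr fun p hp => by
    have hpk : p ≠ k := fun he => hkl (he ▸ hp)
    simp [List.Nodup.mem_erase_iff hR, hpk]

theorem pv_filter_len_one (l R : List String) (k : String)
    (hk : k ∈ l) (hkR : k ∈ R)
    (hlen : (l.filter (fun p => R.contains p)).length = 1) :
    ∀ p ∈ l, p ∈ R → p = k := by
  have hkf : k ∈ l.filter (fun p => R.contains p) := List.mem_filter.2 ⟨hk, by simpa⟩
  rcases List.length_eq_one_iff.1 hlen with ⟨a, ha⟩
  rw [ha] at hkf
  intro p hp hpR
  have hpf : p ∈ l.filter (fun p => R.contains p) := List.mem_filter.2 ⟨hp, by simpa⟩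
  rw [ha] at hpf
  simp only [List.mem_singleton] at hkf hpf
  rw [hpf, ← hkf]

theorem pv_filter_eq_singleton (l R : List String) (hl : l.Nodup) (k : String)
    (hk : k ∈ l) (hkR : k ∈ R) (hothers : ∀ p ∈ l, p ∈ R → p = k) :
    l.filter (fun p => R.contains p) = [k] := by
  have hsub : ∀ p ∈ l.filter (fun p => R.contains p), p = k := by
    intro p hp
    rcases List.mem_filter.1 hp with ⟨h1, h2⟩
    exact hothers p h1 (by simpa using h2)
  have hkf : k ∈ l.filter (fun p => R.contains p) := List.mem_filter.2 ⟨hk, by simpa⟩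
  have hnd : (l.filter (fun p => R.contains p)).Nodup := List.Nodup.filter _ hl
  rcases hfl : l.filter (fun p => R.contains p) with _ | ⟨a, rest⟩
  · rw [hfl] at hkf
    simp at hkf
  · rw [hfl] at hsub hnd
    have ha : a = k := hsub a (by simp)
    have hrest : rest = [] := by
      rcases rest with _ | ⟨b, rest'⟩
      · rfl
      · exfalso
        have hb : b = k := hsub b (by simp)
        have := List.nodup_cons.1 hnd
        exact this.1 (by simp [ha, hb])
    rw [ha, hrest]

-- the master simulation: A's heap loop equals B's greedy selection loop
theorem pv_sim (base diff : List String) (G : PySem.Dict String (PySem.Set String))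
    (hG : ∀ a b, b ∈ G.getD a PySem.Set.empty ↔ a ∈ pvP base diff b)
    (hGnd : ∀ a, (G.getD a PySem.Set.empty).Nodup) :
    ∀ (fuel : Nat) (heap : List (PvPrio × String)) (ind : PySem.Dict String Int)
      (acc R : List String),
      R.Sublist (pvKeys base diff) →
      (∀ k ∈ pvKeys base diff, (k ∈ R ↔ k ∉ acc)) →
      (∀ b ∈ acc, ∀ a ∈ pvP base diff b, a ∈ acc) →
      (∀ b ∈ R, ind.getD b 0 =
        (((PySem.Set.ofList (pvP base diff b)).filter (fun p => R.contains p)).length : Int)) →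
      heap.Perm ((R.filter (fun k => (pvP base diff k).all (fun p => acc.contains p))).map
        (pvEntry base diff)) →
      pyKahnLoop G (altRankDict base) (altRankDict diff) (altRankDict (pvKeys base diff))
          fuel heap ind acc
        = altLoop (fun k => ((altRankDict base).getD k 1000000000,
                             (altRankDict diff).getD k 1000000000,
                             (altRankDict (pvKeys base diff)).getD k 0))
            (pvP base diff) fuel R acc := by
  have hKnd : (pvKeys base diff).Nodup := by
    unfold pvKeys
    exact PySem.List.nodup_dedup _
  intro fuel
  induction fuel with
  | zero =>
    intro heap ind acc R _ _ _ _ _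
    rfl
  | succ fuel ih =>
    intro heap ind acc R hsub hmem hclosed hind hheap
    have hRnd : R.Nodup := hKnd.sublist hsub
    cases hRDc : R.filter (fun k => (pvP base diff k).all (fun p => acc.contains p)) with
    | nil =>
      rw [hRDc] at hheap
      have hhe : heap = [] := by
        have hlen := hheap.length_eq
        simpa using hlen
      subst hhe
      rw [show pyKahnLoop G (altRankDict base) (altRankDict diff)
          (altRankDict (pvKeys base diff)) (fuel + 1) [] ind acc = acc from rfl]
      conv_rhs => rw [altLoop, hRDc]
    | cons r rs =>
      have hRDf : ∀ x ∈ r :: rs, x ∈ R ∧ (pvP base diff x).all (fun p => acc.contains p) := by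
        intro x hx
        rw [← hRDc] at hx
        exact ⟨(List.mem_filter.1 hx).1, (List.mem_filter.1 hx).2⟩
      have hRDnd : (r :: rs).Nodup := hRDc ▸ List.Nodup.filter _ hRnd
      have hkmem : altMinBy (pvPrioF base diff) r rs ∈ r :: rs := by
        unfold altMinBy
        exact pv_foldl_min_mem _ r rs
      set k := altMinBy (pvPrioF base diff) r rs with hkdef
      have hkR : k ∈ R := (hRDf k hkmem).1
      have hkK : k ∈ pvKeys base diff := hsub.subset hkR
      have hkready := (hRDf k hkmem).2
      have hknacc : k ∉ acc := (hmem k hkK).1 hkR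
      have hkmin : ∀ y ∈ r :: rs,
          altLexLt (pvPrioF base diff y) (pvPrioF base diff k) = false := by
        intro y hy
        exact pv_foldl_min_not_lt
          (fun a b => altLexLt (pvPrioF base diff a) (pvPrioF base diff b))
          (fun a => pv_lexLt_irr _) (fun a b c => pv_lexLt_tr _ _ _)
          (fun a b c => pv_lexLt_neg _ _ _) r rs y hy
      rcases heap with _ | ⟨h0, t⟩
      · exfalso
        rw [hRDc] at hheap
        have := hheap.length_eq
        simp at this
      rw [hRDc] at hheap
      set m := t.foldl (fun m e => if pyHeapLt e m then e else m) h0 with hmdef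
      have hmmem : m ∈ h0 :: t := pv_foldl_min_mem _ h0 t
      have hmmin : ∀ e ∈ h0 :: t, pyHeapLt e m = false :=
        pv_foldl_min_not_lt _ pv_heapLt_irr pv_heapLt_tr pv_heapLt_neg h0 t
      have hm : m = pvEntry base diff k := by
        have hmm : m ∈ List.map (pvEntry base diff) (r :: rs) := (hheap.mem_iff).1 hmmem
        rcases List.mem_map.1 hmm with ⟨z, hz, hzm⟩
        by_cases hzk : z = k
        · rw [← hzm, hzk]
        · exfalso
          have hzR : z ∈ R := (hRDf z hz).1
          have hzK : z ∈ pvKeys base diff := hsub.subset hzR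
          have hpne : pvPrioF base diff k ≠ pvPrioF base diff z :=
            fun he => hzk (pv_prio_inj base diff k z hkK hzK he).symm
          have hkheap : pvEntry base diff k ∈ h0 :: t :=
            (hheap.mem_iff).2 (List.mem_map_of_mem hkmem)
          have h1 : pyHeapLt (pvEntry base diff k) m = false := hmmin _ hkheap
          rw [← hzm] at h1
          have h1' : altLexLt (pvPrioF base diff k) (pvPrioF base diff z) = false := by
            rw [← pv_heapLt_of_prio_ne _ _ k z hpne]
            exact h1
          have h2 : altLexLt (pvPrioF base diff z) (pvPrioF base diff k) = false := hkmin z hz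
          exact hpne (pv_lexLt_total _ _ h1' h2)
      have hm2 : m.2 = k := by rw [hm]; rfl
      set fA : String → PvPrio × String := fun n =>
        (((altRankDict base).getD n 1000000000, (altRankDict diff).getD n 1000000000,
          (altRankDict (pvKeys base diff)).getD n 0), n) with hfA
      have hstepA : pyKahnLoop G (altRankDict base) (altRankDict diff)
          (altRankDict (pvKeys base diff)) (fuel + 1) (h0 :: t) ind acc
        = pyKahnLoop G (altRankDict base) (altRankDict diff) (altRankDict (pvKeys base diff))
            fuel
            ((G.getD m.2 PySem.Set.empty).foldl
              (fun (st : List (PvPrio × String) × PySem.Dict String Int) n =>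
                let ind := st.2.modify n 0 (fun x => x - 1)
                if ind.getD n 0 == 0 then (st.1 ++ [fA n], ind) else (st.1, ind))
              ((h0 :: t).erase m, ind)).1
            ((G.getD m.2 PySem.Set.empty).foldl
              (fun (st : List (PvPrio × String) × PySem.Dict String Int) n =>
                let ind := st.2.modify n 0 (fun x => x - 1)
                if ind.getD n 0 == 0 then (st.1 ++ [fA n], ind) else (st.1, ind))
              ((h0 :: t).erase m, ind)).2
            (acc ++ [m.2]) := by
        rw [hmdef, hfA]
        rfl
      rw [hstepA, pv_kahn_fold fA (G.getD m.2 PySem.Set.empty) (hGnd m.2)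
        ((h0 :: t).erase m) ind, hm2]
      have hstepB : altLoop
            (fun k => ((altRankDict base).getD k 1000000000, (altRankDict diff).getD k 1000000000,
              (altRankDict (pvKeys base diff)).getD k 0))
            (pvP base diff) (fuel + 1) R acc
          = altLoop
            (fun k => ((altRankDict base).getD k 1000000000, (altRankDict diff).getD k 1000000000,
              (altRankDict (pvKeys base diff)).getD k 0))
            (pvP base diff) fuel ((PySem.List.remove? R k).getD R) (acc ++ [k]) := by
        conv_lhs => rw [altLoop, hRDc]
        rw [hkdef]
        rfl
      rw [hstepB, PySem.List.remove?_eq_some_erase R k hkR, Option.getD_some]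
      have hsub' : (R.erase k).Sublist (pvKeys base diff) :=
        List.Sublist.trans List.erase_sublist hsub
      have hmem' : ∀ x ∈ pvKeys base diff, x ∈ R.erase k ↔ x ∉ acc ++ [k] := by
        intro x hx
        rw [List.Nodup.mem_erase_iff hRnd]
        have hx1 := hmem x hx
        simp only [List.mem_append, List.mem_singleton]
        tauto
      have hclosed' : ∀ b ∈ acc ++ [k], ∀ a ∈ pvP base diff b, a ∈ acc ++ [k] := by
        intro b hb a ha
        rcases List.mem_append.1 hb with hb1 | hb2
        · exact List.mem_append_left _ (hclosed b hb1 a ha)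
        · have hbk : b = k := by simpa using hb2
          subst hbk
          refine List.mem_append_left _ ?_
          have hall := hkready
          rw [List.all_eq_true] at hall
          simpa using hall a ha
      have hind' : ∀ b ∈ R.erase k,
          ((G.getD k PySem.Set.empty).foldl (fun d n => d.modify n 0 (fun x => x - 1)) ind).getD b 0
            = (((PySem.Set.ofList (pvP base diff b)).filter
                (fun p => (R.erase k).contains p)).length : Int) := by
        intro b hb
        obtain ⟨hbne, hbR⟩ := (List.Nodup.mem_erase_iff hRnd).1 hb
        rw [pv_dec_getD, hind b hbR]
        by_cases hbS : b ∈ G.getD k PySem.Set.empty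
        · have hkP : k ∈ pvP base diff b := (hG k b).1 hbS
          have hcount : List.count b (G.getD k PySem.Set.empty) = 1 :=
            List.count_eq_one_of_mem (hGnd k) hbS
          rw [hcount]
          have hkOf : k ∈ PySem.Set.ofList (pvP base diff b) :=
            (PySem.Set.mem_ofList _ _).2 hkP
          have hlen := pv_filter_erase_len (PySem.Set.ofList (pvP base diff b)) R
            (PySem.Set.nodup_ofList _) hRnd k hkOf hkR
          omega
        · have hkP : k ∉ pvP base diff b := fun hk => hbS ((hG k b).2 hk)
          have hcount : List.count b (G.getD k PySem.Set.empty) = 0 :=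
            List.count_eq_zero.2 hbS
          rw [hcount]
          have hkOf : k ∉ PySem.Set.ofList (pvP base diff b) :=
            fun hk => hkP ((PySem.Set.mem_ofList _ _).1 hk)
          rw [pv_filter_congr_not_mem _ R hRnd k hkOf]
          simp
      have hheap' : ((h0 :: t).erase m
            ++ ((G.getD k PySem.Set.empty).filter (fun n => ind.getD n 0 == 1)).map fA).Perm
          (((R.erase k).filter
            (fun x => (pvP base diff x).all (fun p => (acc ++ [k]).contains p))).map
            (pvEntry base diff)) := by
        have hinj : Function.Injective (pvEntry base diff) := fun a b he => congrArg Prod.snd he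
        have hfAe : fA = pvEntry base diff := by
          rw [hfA]
          funext n
          rfl
        have hstep1 : ((h0 :: t).erase m).Perm
            (List.map (pvEntry base diff) ((r :: rs).erase k)) := by
          have h1 := hheap.erase m
          rw [hm] at h1
          rw [← List.map_erase hinj] at h1
          rw [hm]
          exact h1
        have hall : ((h0 :: t).erase m
              ++ ((G.getD k PySem.Set.empty).filter (fun n => ind.getD n 0 == 1)).map fA).Perm
            (List.map (pvEntry base diff)
              ((r :: rs).erase k
                ++ (G.getD k PySem.Set.empty).filter (fun n => ind.getD n 0 == 1))) := by
          rw [List.map_append, hfAe]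
          exact hstep1.append (List.Perm.refl _)
        refine hall.trans (List.Perm.map _ ?_)
        have hnd1 : ((r :: rs).erase k
            ++ (G.getD k PySem.Set.empty).filter (fun n => ind.getD n 0 == 1)).Nodup := by
          refine List.Nodup.append (List.Nodup.erase _ hRDnd)
            (List.Nodup.filter _ (hGnd k)) ?_
          intro x hx1 hx2
          have hxrs : x ∈ r :: rs := List.mem_of_mem_erase hx1
          have hxready := (hRDf x hxrs).2
          have hxS : x ∈ G.getD k PySem.Set.empty := List.mem_of_mem_filter hx2
          have hkP : k ∈ pvP base diff x := (hG k x).1 hxS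
          rw [List.all_eq_true] at hxready
          exact hknacc (by simpa using hxready k hkP)
        have hnd2 : ((R.erase k).filter
            (fun x => (pvP base diff x).all (fun p => (acc ++ [k]).contains p))).Nodup :=
          List.Nodup.filter _ (List.Nodup.erase _ hRnd)
        refine pv_perm_of_mem_iff _ _ hnd1 hnd2 ?_
        intro x
        constructor
        · intro hx
          rcases List.mem_append.1 hx with hx1 | hx2
          · have hxrs : x ∈ r :: rs := List.mem_of_mem_erase hx1
            have hxk : x ≠ k := ((List.Nodup.mem_erase_iff hRDnd).1 hx1).1
            have hxR : x ∈ R := (hRDf x hxrs).1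
            have hxready := (hRDf x hxrs).2
            refine List.mem_filter.2 ⟨(List.Nodup.mem_erase_iff hRnd).2 ⟨hxk, hxR⟩, ?_⟩
            rw [List.all_eq_true] at hxready ⊢
            intro p hp
            have hpacc : p ∈ acc := by simpa using hxready p hp
            simp [List.mem_append, hpacc]
          · have hxS : x ∈ G.getD k PySem.Set.empty := List.mem_of_mem_filter hx2
            have hcond : (ind.getD x 0 == 1) = true :=
              List.of_mem_filter (p := fun n => ind.getD n 0 == 1) hx2
            have hkP : k ∈ pvP base diff x := (hG k x).1 hxS
            have hxK : x ∈ pvKeys base diff := (pv_P_mem base diff x k hkP).2.1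
            have hxk : x ≠ k := fun he => (pv_P_mem base diff x k hkP).2.2 he.symm
            have hxR : x ∈ R := by
              by_contra hxR
              have hxacc : x ∈ acc := by
                have := hmem x hxK
                tauto
              exact hknacc (hclosed x hxacc k hkP)
            have hlen1 : ((PySem.Set.ofList (pvP base diff x)).filter
                (fun p => R.contains p)).length = 1 := by
              rw [beq_iff_eq, hind x hxR] at hcond
              exact_mod_cast hcond
            have honly := pv_filter_len_one (PySem.Set.ofList (pvP base diff x)) R k
              ((PySem.Set.mem_ofList _ _).2 hkP) hkR hlen1
            refine List.mem_filter.2 ⟨(List.Nodup.mem_erase_iff hRnd).2 ⟨hxk, hxR⟩, ?_⟩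
            rw [List.all_eq_true]
            intro p hp
            have hpK : p ∈ pvKeys base diff := (pv_P_mem base diff x p hp).1
            by_cases hpR : p ∈ R
            · have hpk : p = k := honly p ((PySem.Set.mem_ofList _ _).2 hp) hpR
              simp [hpk, List.mem_append]
            · have hpacc : p ∈ acc := by
                have := hmem p hpK
                tauto
              simp [List.mem_append, hpacc]
        · intro hx
          rcases List.mem_filter.1 hx with ⟨hx1, hx2⟩
          obtain ⟨hxk, hxR⟩ := (List.Nodup.mem_erase_iff hRnd).1 hx1
          rw [List.all_eq_true] at hx2
          by_cases hkP : k ∈ pvP base diff x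
          · refine List.mem_append.2 (Or.inr (List.mem_filter.2 ⟨(hG k x).2 hkP, ?_⟩))
            have hsingle : (PySem.Set.ofList (pvP base diff x)).filter
                (fun p => R.contains p) = [k] := by
              apply pv_filter_eq_singleton _ _ (PySem.Set.nodup_ofList _) k
                ((PySem.Set.mem_ofList _ _).2 hkP) hkR
              intro p hpOf hpR
              have hpP := (PySem.Set.mem_ofList _ _).1 hpOf
              have hcp := hx2 p hpP
              simp only [List.contains_eq_mem, List.mem_append, List.mem_singleton,
                decide_eq_true_eq] at hcp
              rcases hcp with hpacc | hpk
              · exact absurd hpR (by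
                  have := hmem p (pv_P_mem base diff x p hpP).1
                  tauto)
              · exact hpk
            rw [hind x hxR, hsingle]
            simp
          · refine List.mem_append.2 (Or.inl ((List.Nodup.mem_erase_iff hRDnd).2 ⟨hxk, ?_⟩))
            rw [← hRDc]
            refine List.mem_filter.2 ⟨hxR, ?_⟩
            rw [List.all_eq_true]
            intro p hp
            have hcp := hx2 p hp
            simp only [List.contains_eq_mem, List.mem_append, List.mem_singleton,
              decide_eq_true_eq] at hcp
            rcases hcp with hpacc | hpk
            · simpa using hpacc
            · exact absurd (hpk ▸ hp) hkP
      exact ih _ _ _ _ hsub' hmem' hclosed' hind' hheap'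

-- proof-side names for the edge state and initial heap A builds
def pvST (base diff : List String) :
    PySem.Dict String (PySem.Set String) × PySem.Dict String Int :=
  pyBoundaryFold base (PySem.Set.ofList base)
    ((diff.zip diff.tail).foldl (fun st p => pyAddEdge st p.1 p.2)
      ((base.zip base.tail).foldl (fun st p => pyAddEdge st p.1 p.2)
        ((PySem.List.dedup (base ++ diff)).foldl
            (fun d k => d.insert k PySem.Set.empty) PySem.Dict.empty,
         (PySem.List.dedup (base ++ diff)).foldl
            (fun d k => d.insert k (0 : Int)) PySem.Dict.empty))) diff

def pvHeap0 (base diff : List String) : List (PvPrio × String) :=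
  (PySem.List.enumerate (PySem.List.dedup (base ++ diff))).foldl
    (fun h p => if (pvST base diff).2.getD p.2 0 == 0 then
        h ++ [(((altRankDict base).getD p.2 1000000000, (altRankDict diff).getD p.2 1000000000,
                p.1), p.2)]
      else h) []

theorem pv_EL_inv (base diff : List String) :
    PvInv (pvEL base diff) (pvST base diff).1 (pvST base diff).2 := by
  have h0 : PvInv []
      ((PySem.List.dedup (base ++ diff)).foldl
        (fun d k => d.insert k PySem.Set.empty) PySem.Dict.empty)
      ((PySem.List.dedup (base ++ diff)).foldl
        (fun d k => d.insert k (0 : Int)) PySem.Dict.empty) := by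
    constructor
    · intro a
      rw [pv_getD_const_fold]
      split_ifs <;> rfl
    · intro b
      rw [pv_getD_const_fold]
      split_ifs <;> rfl
  have h1 := pv_addEdge_fold' (base.zip base.tail) []
    ((PySem.List.dedup (base ++ diff)).foldl
        (fun d k => d.insert k PySem.Set.empty) PySem.Dict.empty,
     (PySem.List.dedup (base ++ diff)).foldl
        (fun d k => d.insert k (0 : Int)) PySem.Dict.empty) h0
  rw [List.nil_append] at h1
  have h2 := pv_addEdge_fold' (diff.zip diff.tail) _
    ((base.zip base.tail).foldl (fun st p => pyAddEdge st p.1 p.2)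
      ((PySem.List.dedup (base ++ diff)).foldl
          (fun d k => d.insert k PySem.Set.empty) PySem.Dict.empty,
       (PySem.List.dedup (base ++ diff)).foldl
          (fun d k => d.insert k (0 : Int)) PySem.Dict.empty)) h1
  have h3 := pv_addEdge_fold' (altExtra base diff) _
    ((diff.zip diff.tail).foldl (fun st p => pyAddEdge st p.1 p.2)
      ((base.zip base.tail).foldl (fun st p => pyAddEdge st p.1 p.2)
        ((PySem.List.dedup (base ++ diff)).foldl
            (fun d k => d.insert k PySem.Set.empty) PySem.Dict.empty,
         (PySem.List.dedup (base ++ diff)).foldl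
            (fun d k => d.insert k (0 : Int)) PySem.Dict.empty))) h2
  rw [← pv_boundary_fold_eq base diff] at h3
  exact h3

theorem pv_main (base diff : List String) :
    stable_topological_order base diff = stable_topological_order_alt base diff := by
  have hEL := pv_EL_inv base diff
  have hG : ∀ a b, b ∈ (pvST base diff).1.getD a PySem.Set.empty ↔ a ∈ pvP base diff b := by
    intro a b
    rw [hEL.1 a, PySem.Set.mem_ofList, pv_to_from, pv_from_EL]
  have hGnd : ∀ a, ((pvST base diff).1.getD a PySem.Set.empty).Nodup := by
    intro a
    rw [hEL.1 a]
    exact PySem.Set.nodup_ofList _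
  have hmem0 : ∀ k ∈ pvKeys base diff,
      (k ∈ PySem.List.dedup (base ++ diff) ↔ k ∉ ([] : List String)) := by
    intro kk hk
    simpa [pvKeys] using hk
  have hclosed0 : ∀ b ∈ ([] : List String), ∀ a ∈ pvP base diff b, a ∈ ([] : List String) := by
    simp
  have hind0 : ∀ b ∈ PySem.List.dedup (base ++ diff), (pvST base diff).2.getD b 0 =
      (((PySem.Set.ofList (pvP base diff b)).filter
        (fun p => (PySem.List.dedup (base ++ diff)).contains p)).length : Int) := by
    intro b hb
    have hfid : (PySem.Set.ofList (pvP base diff b)).filter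
        (fun p => (PySem.List.dedup (base ++ diff)).contains p)
        = PySem.Set.ofList (pvP base diff b) :=
      List.filter_eq_self.2 fun p hp => by
        have := (pv_P_mem base diff b p ((PySem.Set.mem_ofList _ _).1 hp)).1
        simpa [pvKeys] using this
    rw [hEL.2 b, pv_from_EL, hfid]
  have hcond0 : ∀ x ∈ PySem.List.dedup (base ++ diff),
      ((pvST base diff).2.getD x 0 == 0)
        = ((pvP base diff x).all (fun p => ([] : List String).contains p)) := by
    intro x hx
    rw [hEL.2 x, pv_from_EL]
    rcases hP : pvP base diff x with _ | ⟨a, as⟩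
    · simp [PySem.Set.ofList]
    · have hmem : a ∈ PySem.Set.ofList (a :: as) := (PySem.Set.mem_ofList _ _).2 (by simp)
      have hpos : 0 < (PySem.Set.ofList (a :: as)).length := List.length_pos_of_mem hmem
      have hL : (((PySem.Set.ofList (a :: as)).length : Int) == 0) = false := by
        rw [beq_eq_false_iff_ne]
        intro he
        omega
      rw [hL]
      simp
  have hheap0 : pvHeap0 base diff
      = (((PySem.List.dedup (base ++ diff)).filter
          (fun x => (pvP base diff x).all (fun p => ([] : List String).contains p))).map
          (pvEntry base diff)) := by
    unfold pvHeap0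
    rw [PySem.List.foldl_append_if
      (fun p : Int × String => (pvST base diff).2.getD p.2 0 == 0)
      (fun p : Int × String => (((altRankDict base).getD p.2 1000000000,
        (altRankDict diff).getD p.2 1000000000, p.1), p.2))
      (PySem.List.enumerate (PySem.List.dedup (base ++ diff))) []]
    rw [List.nil_append]
    have hKnd : (PySem.List.dedup (base ++ diff)).Nodup := PySem.List.nodup_dedup _
    have hmapf : ∀ pr ∈ (PySem.List.enumerate (PySem.List.dedup (base ++ diff))).filter
        (fun p : Int × String => (pvST base diff).2.getD p.2 0 == 0),
        (((altRankDict base).getD pr.2 1000000000, (altRankDict diff).getD pr.2 1000000000,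
          pr.1), pr.2) = pvEntry base diff pr.2 := by
      intro pr hpr
      have hpe := List.mem_of_mem_filter hpr
      rcases (PySem.List.mem_enumerate_iff _ _ _).1 hpe with ⟨j, hj, hpr'⟩
      subst hpr'
      have hrk : (altRankDict (pvKeys base diff)).getD
          ((PySem.List.dedup (base ++ diff))[j]) 0 = (j : Int) := by
        rw [pv_rank_getD _ (by simpa [pvKeys] using hKnd) _
          (by simp [pvKeys])]
        rw [show List.idxOf ((PySem.List.dedup (base ++ diff))[j]) (pvKeys base diff) = j from
          List.Nodup.idxOf_getElem (by simpa [pvKeys] using hKnd) j (by simpa [pvKeys] using hj)]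
      simp only [pvEntry, pvPrioF, hrk, zero_add]
    rw [List.map_congr_left hmapf]
    rw [show (fun pr : Int × String => pvEntry base diff pr.2)
        = (pvEntry base diff) ∘ (fun pr : Int × String => pr.2) from rfl, ← List.map_map]
    rw [show (fun p : Int × String => (pvST base diff).2.getD p.2 0 == 0)
        = ((fun x => (pvST base diff).2.getD x 0 == 0) ∘ (fun pr : Int × String => pr.2))
        from rfl]
    rw [← List.filter_map (f := fun pr : Int × String => pr.2)
      (p := fun x => (pvST base diff).2.getD x 0 == 0)]
    rw [show List.map (fun pr : Int × String => pr.2)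
        (PySem.List.enumerate (PySem.List.dedup (base ++ diff)))
        = PySem.List.dedup (base ++ diff) from PySem.List.map_snd_enumerate _ _]
    rw [List.filter_congr hcond0]
  have hperm : (pvHeap0 base diff).Perm
      ((((PySem.List.dedup (base ++ diff)).filter
        (fun x => (pvP base diff x).all (fun p => ([] : List String).contains p))).map
        (pvEntry base diff))) := by
    rw [hheap0]
  have hfinal := pv_sim base diff (pvST base diff).1 hG hGnd
    (PySem.List.dedup (base ++ diff)).length (pvHeap0 base diff) (pvST base diff).2 []
    (PySem.List.dedup (base ++ diff)) (List.Sublist.refl _) hmem0 hclosed0 hind0 hperm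
  simp only [stable_topological_order, stable_topological_order_alt, pyAddEdges]
  rw [show pyRankDict = altRankDict from rfl]
  exact hfinal

-- ===== VERDICT (by name: the statement is the Claim_ definition above) =====
theorem stable_topological_order_spec : Claim_equal_stable_topological_order := by
  intro base_order diff_order _ _
  exact pv_main base_order diff_order
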